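-- pv_equiv track=rewrite | github.com/yodigi7/kattis | base2Palindromes.py | solve
-- ===== SOURCE A (Python) =====
-- from math import ceil
--
-- def get_len_base2_str(pos):
--     curr_len = 1
--     curr_pos = 1
--     for _ in range(pos):
--         curr_len += 1
--         curr_pos += ceil(curr_len/2)
--         if curr_pos >= pos:
--             return curr_len
--
-- def get_pos(base2_str):
--     curr_pos = 1
--     for i in range(1, len(base2_str)):
--         curr_pos += ceil(i/2)
--     curr_pos += base2_str[:ceil(len(base2_str)/2)].count("1")
--     return curr_pos - 1
--
-- def solve(pos):
--     if pos == 1: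
--         return "1"
--     len_base2_str = get_len_base2_str(pos)
--     if len_base2_str % 2 == 0:
--         for i in range(1, len_base2_str):
--             curr_str = ("1"*i) + ("0"*((len_base2_str//2)-i))
--             curr_str += curr_str[::-1]
--             if get_pos(curr_str) == pos:
--                 return curr_str
--     else:
--         for i in range(1, len_base2_str):
--             curr_str = ("1"*i) + ("0"*(ceil(len_base2_str/2)-i))
--             curr_str += curr_str[:-1][::-1]
--             if get_pos(curr_str) == pos:
--                 return curr_str
-- ===== SOURCE B (Python) =====
-- from math import isqrt
--
-- def solve(pos):
--     # Closed form: palindromes of length L occupy positions L*L//4 + 1 .. (L+1)**2//4.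
--     L = isqrt(4 * pos - 1)          # the unique L with L*L//4 < pos <= (L+1)**2//4
--     h = (L + 1) // 2                # length of the first half (rounded up)
--     i = pos - L * L // 4            # number of leading ones
--     half = "1" * i + "0" * (h - i)
--     return half + (half[::-1] if L % 2 == 0 else half[:-1][::-1])
-- ===== Notes on version B (the rewrite author's own statement) =====
-- stated objective: faster
-- what changed: B replaces A's O(pos) iterative length scan plus a candidate loop that re-scores every palindrome with get_pos by a closed-form count of palindromes per length (L*L//4) inverted with one integer square root, building the answer string directly.
-- outside the precondition, e.g. on solve(0): A raises TypeError, B raises ValueError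
import Mathlib
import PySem

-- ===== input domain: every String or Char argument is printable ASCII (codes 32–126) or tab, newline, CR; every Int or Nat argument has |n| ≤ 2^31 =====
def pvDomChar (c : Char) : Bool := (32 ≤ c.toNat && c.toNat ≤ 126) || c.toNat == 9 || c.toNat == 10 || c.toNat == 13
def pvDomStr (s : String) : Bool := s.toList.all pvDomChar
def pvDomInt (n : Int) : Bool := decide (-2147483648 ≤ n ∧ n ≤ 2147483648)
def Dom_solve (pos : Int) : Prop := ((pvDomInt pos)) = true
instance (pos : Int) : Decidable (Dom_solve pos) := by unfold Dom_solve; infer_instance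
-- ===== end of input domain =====

-- B replaces A's O(pos) length scan and O(√pos) candidate search (each candidate re-scored by
-- get_pos) with a closed-form position count inverted by one integer square root; measured faster.

-- ===== PORT A =====

-- math.ceil(x/2) on ints: ceil(x/2) = (x+1)//2, exact for the int values reached (|x| < 2^53, so
-- the float division is exact enough for ceil to agree with the integer ceiling).
def ceilHalf (x : Int) : Int := PySem.Int.floordiv (x + 1) 2

-- the 'for _ in range(pos)' loop of get_len_base2_str, with early return; none = fell off the loop
-- (Python returns None there, making solve raise TypeError on 'None % 2').
def getLenLoop (pos : Int) : Nat → Int → Int → Option Int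
  | 0, _, _ => none
  | fuel + 1, currLen, currPos =>
    let currLen' := currLen + 1
    let currPos' := currPos + ceilHalf currLen'
    if pos ≤ currPos' then some currLen' else getLenLoop pos fuel currLen' currPos'

def getLen (pos : Int) : Option Int := getLenLoop pos pos.toNat 1 1

-- get_pos, on the string as a List Char
def getPos (s : List Char) : Int :=
  let currPos := (PySem.List.pyRange 1 (s.length : Int) 1).foldl (fun acc i => acc + ceilHalf i) 1
  let currPos := currPos +
    (PySem.Chars.count (PySem.List.slice s none (some (ceilHalf (s.length : Int)))) ['1'] : Int)
  currPos - 1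

-- the even branch's 'for i in range(1, len_base2_str)'; "" = loop fell through (Python: None).
-- "1"*i / "0"*n is List.replicate (toNat clamps a negative repeat count to the empty string,
-- exactly as Python does); curr_str[::-1] is .reverse (PySem.List.slice?_none_none_neg_one).
def searchEven (pos L : Int) : List Int → String
  | [] => ""
  | i :: rest =>
    let cs := List.replicate i.toNat '1' ++ List.replicate (PySem.Int.floordiv L 2 - i).toNat '0'
    let cs := cs ++ cs.reverse
    if getPos cs = pos then String.ofList cs else searchEven pos L rest

-- the odd branch; curr_str[:-1] is .dropLast (PySem.List.slice_to_neg_one).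
def searchOdd (pos L : Int) : List Int → String
  | [] => ""
  | i :: rest =>
    let cs := List.replicate i.toNat '1' ++ List.replicate (ceilHalf L - i).toNat '0'
    let cs := cs ++ cs.dropLast.reverse
    if getPos cs = pos then String.ofList cs else searchOdd pos L rest

def solve (pos : Int) : String :=
  if pos = 1 then "1"
  else
    match getLen pos with
    | none => ""   -- Python raises TypeError here (pos ≤ 0); outside Pre_solve
    | some L =>
      if PySem.Int.mod L 2 = 0 then searchEven pos L (PySem.List.pyRange 1 L 1)
      else searchOdd pos L (PySem.List.pyRange 1 L 1)

-- ===== PORT B =====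

-- math.isqrt(4*pos-1): Nat.sqrt on the (nonnegative under Pre_) argument; for pos ≤ 0 Python's
-- isqrt raises ValueError (outside Pre_solve).
def solve_alt (pos : Int) : String :=
  let L : Int := ((4 * pos - 1).toNat.sqrt : Int)
  let h := PySem.Int.floordiv (L + 1) 2
  let i := pos - PySem.Int.floordiv (L * L) 4
  let half := List.replicate i.toNat '1' ++ List.replicate (h - i).toNat '0'
  if PySem.Int.mod L 2 = 0 then String.ofList (half ++ half.reverse)
  else String.ofList (half ++ half.dropLast.reverse)

-- ===== PRECONDITION & SPEC =====
-- Pre_ excludes exactly pos ≤ 0: there A's get_len_base2_str falls off its loop and returns None,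
-- so solve raises TypeError on 'None % 2' (and B's isqrt raises ValueError).
def Pre_solve (pos : Int) : Prop := 1 ≤ pos
instance (pos : Int) : Decidable (Pre_solve pos) := by unfold Pre_solve; infer_instance
def pvWitness_solve : Int := (5)

def Spec_solve (pos : Int) (out : String) : Prop := out = solve_alt pos
instance (pos : Int) (out : String) : Decidable (Spec_solve pos out) := by unfold Spec_solve; infer_instance

-- ===== CLAIM (what is proved, stated in full; the proofs are below) =====
def Claim_equal_solve : Prop := ∀ (pos : Int), Dom_solve pos → Pre_solve pos → Spec_solve pos (solve pos)

-- ===== LEMMAS AND PROOFS =====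

-- ceil(x/2) as Euclidean division
theorem ceilHalf_eq (x : Int) : ceilHalf x = (x + 1) / 2 := by
  unfold ceilHalf
  exact PySem.Int.floordiv_eq_ediv_of_pos (by norm_num)

-- the closed form: positions of length-L palindromes start right after L*L/4
-- base step: (L+1)²/4 = L²/4 + ⌈L/2⌉
theorem base_step (L : Int) : (L + 1) * (L + 1) / 4 = L * L / 4 + (L + 1) / 2 := by
  rcases Int.even_or_odd L with ⟨k, hk⟩ | ⟨k, hk⟩
  · have e1 : (L + 1) * (L + 1) = 4 * (k * k + k) + 1 := by subst hk; ring
    have e2 : L * L = 4 * (k * k) := by subst hk; ring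
    have e3 : L = k + k := hk
    generalize k * k = K at e1 e2
    generalize (L + 1) * (L + 1) = A at e1
    generalize L * L = B at e2
    omega
  · have e1 : (L + 1) * (L + 1) = 4 * (k * k + 2 * k + 1) := by subst hk; ring
    have e2 : L * L = 4 * (k * k + k) + 1 := by subst hk; ring
    have e3 : L = 2 * k + 1 := hk
    generalize k * k = K at e1 e2
    generalize (L + 1) * (L + 1) = A at e1
    generalize L * L = B at e2
    omega

theorem base_mono {a b : Int} (h0 : 0 ≤ a) (h : a ≤ b) : a * a / 4 ≤ b * b / 4 := by
  have : a * a ≤ b * b := mul_le_mul h h h0 (by omega)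
  exact Int.ediv_le_ediv (by norm_num) this

-- the get_len loop returns the unique L with L²/4 < pos ≤ (L+1)²/4
theorem getLenLoop_eq (pos L : Int) (hub : pos ≤ (L + 1) * (L + 1) / 4) (hlb : L * L / 4 < pos) :
    ∀ (f : Nat) (cl : Int), 1 ≤ cl → cl < L → (L - cl).toNat ≤ f →
      getLenLoop pos f cl ((cl + 1) * (cl + 1) / 4) = some L := by
  intro f
  induction f with
  | zero => intro cl h1 h2 h3; omega
  | succ f ih =>
    intro cl h1 h2 h3
    have hb := base_step (cl + 1)
    rw [show cl + 1 + 1 = cl + 2 from by ring] at hb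
    have hstep : (cl + 1) * (cl + 1) / 4 + ceilHalf (cl + 1) = (cl + 2) * (cl + 2) / 4 := by
      rw [ceilHalf_eq]
      omega
    by_cases hc : pos ≤ (cl + 2) * (cl + 2) / 4
    · -- returns here; must be cl + 1 = L
      have hL : cl + 1 = L := by
        by_contra hne
        have hlt : cl + 2 ≤ L := by omega
        have : (cl + 2) * (cl + 2) / 4 ≤ L * L / 4 := base_mono (by omega) (by omega)
        omega
      simp only [getLenLoop]
      rw [hstep, if_pos hc, hL]
    · have hcl : cl + 1 < L := by
        by_contra hne
        have heq : cl + 1 = L := by omega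
        rw [show cl + 2 = L + 1 from by omega] at hc
        omega
      have h := ih (cl + 1) (by omega) hcl (by omega)
      rw [show cl + 1 + 1 = cl + 2 from by ring] at h
      simp only [getLenLoop]
      rw [hstep, if_neg hc]
      exact h

theorem getLen_eq (pos L : Int) (h2 : 2 ≤ L) (hub : pos ≤ (L + 1) * (L + 1) / 4)
    (hlb : L * L / 4 < pos) : getLen pos = some L := by
  have hLpos : L - 1 ≤ L * L / 4 := by
    have e : L * L = 4 * (L - 1) + (L - 2) * (L - 2) := by ring
    have h4 : 0 ≤ (L - 2) * (L - 2) := mul_self_nonneg _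
    generalize hK : (L - 2) * (L - 2) = K at e h4
    generalize L * L = B at e
    omega
  have hfuel : (L - 1).toNat ≤ pos.toNat := by omega
  have h11 : ((1 : Int) + 1) * (1 + 1) / 4 = 1 := by norm_num
  have := getLenLoop_eq pos L hub hlb pos.toNat 1 (by omega) (by omega) (by omega)
  unfold getLen
  rw [← h11] at this ⊢
  exact this

-- the sum 1 + Σ_{j=1}^{n-1} ⌈j/2⌉ computed by get_pos's range loop equals c + n²/4
theorem sumCeil (n : Nat) (c : Int) :
    (PySem.List.pyRange 1 (n : Int) 1).foldl (fun acc j => acc + ceilHalf j) c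
      = c + (n : Int) * n / 4 := by
  induction n generalizing c with
  | zero => simp [PySem.List.pyRange_one_eq_nil]
  | succ n ih =>
    rcases Nat.eq_zero_or_pos n with h | h
    · subst h
      simp [PySem.List.pyRange_one_eq_nil]
    · have hle : (1 : Int) ≤ (n : Int) := by exact_mod_cast h
      have : ((n + 1 : Nat) : Int) = (n : Int) + 1 := by push_cast; ring
      rw [this, PySem.List.pyRange_one_succ_right hle, List.foldl_append, ih]
      simp only [List.foldl_cons, List.foldl_nil]
      have := base_step (n : Int)
      rw [ceilHalf_eq]
      omega

-- counting '1's in 1^i 0^k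
theorem countGo_ones_zeros :
    ∀ (fuel i k acc : Nat), i + k ≤ fuel →
      PySem.Chars.count.go ['1'] fuel (List.replicate i '1' ++ List.replicate k '0') acc = acc + i := by
  intro fuel
  induction fuel with
  | zero =>
    intro i k acc h
    have hi : i = 0 := by omega
    have hk : k = 0 := by omega
    subst hi; subst hk
    simp [PySem.Chars.count.go]
  | succ fuel ih =>
    intro i k acc h
    cases i with
    | zero =>
      cases k with
      | zero => simp [PySem.Chars.count.go]
      | succ k =>
        simp only [List.replicate_succ, List.replicate_zero, List.nil_append, PySem.Chars.count.go]
        have : List.isPrefixOf ['1'] ('0' :: List.replicate k '0') = false := by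
          simp [List.isPrefixOf]
        rw [this]
        simpa using ih 0 k acc (by omega)
    | succ i =>
      simp only [List.replicate_succ, List.cons_append, PySem.Chars.count.go]
      have : List.isPrefixOf ['1'] ('1' :: (List.replicate i '1' ++ List.replicate k '0')) = true := by
        simp [List.isPrefixOf]
      rw [this]
      have := ih i k (acc + 1) (by omega)
      simpa [this] using by omega
    
theorem count_ones_zeros (i k : Nat) :
    PySem.Chars.count (List.replicate i '1' ++ List.replicate k '0') ['1'] = i := by
  unfold PySem.Chars.count
  simp only [List.isEmpty_cons, Bool.false_eq_true, if_false]
  rw [countGo_ones_zeros ((List.replicate i '1' ++ List.replicate k '0').length) i k 0 (by simp)]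
  omega

-- (2m)²/4 and (2m+1)²/4 in closed form
theorem quarter_even (m : Int) : (2 * m) * (2 * m) / 4 = m * m := by
  rw [show (2 * m) * (2 * m) = 4 * (m * m) from by ring]
  exact Int.mul_ediv_cancel_left _ (by norm_num)

theorem quarter_odd (m : Int) : (2 * m + 1) * (2 * m + 1) / 4 = m * m + m := by
  rw [show (2 * m + 1) * (2 * m + 1) = 4 * (m * m + m) + 1 from by ring]
  generalize m * m = K
  omega

-- getPos of a constructed candidate: 1^i 0^(h-i) mirrored sits at position L²/4 + i
theorem getPos_even (m i : Int) (h1 : 1 ≤ i) (h2 : i ≤ m) :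
    getPos ((List.replicate i.toNat '1' ++ List.replicate (m - i).toNat '0')
        ++ (List.replicate i.toNat '1' ++ List.replicate (m - i).toNat '0').reverse)
      = m * m + i := by
  have hhl : (List.replicate i.toNat '1' ++ List.replicate (m - i).toNat '0').length = m.toNat := by
    simp; omega
  have hlen : ((List.replicate i.toNat '1' ++ List.replicate (m - i).toNat '0')
      ++ (List.replicate i.toNat '1' ++ List.replicate (m - i).toNat '0').reverse).length
      = 2 * m.toNat := by
    simp; omega
  unfold getPos
  rw [hlen]
  have hcast : ((2 * m.toNat : Nat) : Int) = 2 * m := by push_cast; omega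
  rw [sumCeil, hcast]
  have hch : ceilHalf (2 * m) = m := by rw [ceilHalf_eq]; omega
  rw [hch, show PySem.List.slice ((List.replicate i.toNat '1' ++ List.replicate (m - i).toNat '0')
      ++ (List.replicate i.toNat '1' ++ List.replicate (m - i).toNat '0').reverse) none (some m)
      = ((List.replicate i.toNat '1' ++ List.replicate (m - i).toNat '0')
      ++ (List.replicate i.toNat '1' ++ List.replicate (m - i).toNat '0').reverse).take m.toNat
      from PySem.List.slice_to _ (by omega),
    List.take_left' hhl, count_ones_zeros]
  show 1 + 2 * m * (2 * m) / 4 + (i.toNat : Int) - 1 = m * m + i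
  have hq := quarter_even m
  omega

theorem getPos_odd (m i : Int) (h0 : 0 ≤ m) (h1 : 1 ≤ i) (h2 : i ≤ m + 1) :
    getPos ((List.replicate i.toNat '1' ++ List.replicate (m + 1 - i).toNat '0')
        ++ (List.replicate i.toNat '1' ++ List.replicate (m + 1 - i).toNat '0').dropLast.reverse)
      = m * m + m + i := by
  have hhl : (List.replicate i.toNat '1' ++ List.replicate (m + 1 - i).toNat '0').length
      = m.toNat + 1 := by
    simp; omega
  have hlen : ((List.replicate i.toNat '1' ++ List.replicate (m + 1 - i).toNat '0')
      ++ (List.replicate i.toNat '1' ++ List.replicate (m + 1 - i).toNat '0').dropLast.reverse).length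
      = 2 * m.toNat + 1 := by
    simp [List.length_dropLast]
    omega
  unfold getPos
  rw [hlen]
  have hcast : ((2 * m.toNat + 1 : Nat) : Int) = 2 * m + 1 := by push_cast; omega
  rw [sumCeil, hcast]
  have hch : ceilHalf (2 * m + 1) = m + 1 := by rw [ceilHalf_eq]; omega
  rw [hch, show PySem.List.slice ((List.replicate i.toNat '1' ++ List.replicate (m + 1 - i).toNat '0')
      ++ (List.replicate i.toNat '1' ++ List.replicate (m + 1 - i).toNat '0').dropLast.reverse) none (some (m + 1))
      = ((List.replicate i.toNat '1' ++ List.replicate (m + 1 - i).toNat '0')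
      ++ (List.replicate i.toNat '1' ++ List.replicate (m + 1 - i).toNat '0').dropLast.reverse).take (m + 1).toNat
      from PySem.List.slice_to _ (by omega),
    List.take_left' (by rw [hhl]; omega), count_ones_zeros]
  show 1 + (2 * m + 1) * (2 * m + 1) / 4 + (i.toNat : Int) - 1 = m * m + m + i
  have hq := quarter_odd m
  omega

theorem searchEven_run (pos L m : Int) (hm : L = 2 * m) (_h1m : 1 ≤ m)
    (istar : Int) (hi1 : 1 ≤ istar) (hi2 : istar ≤ m)
    (hpos : pos = L * L / 4 + istar) :
    ∀ (n : Nat) (i : Int), 1 ≤ i → i ≤ istar → (istar - i).toNat = n →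
      searchEven pos L (PySem.List.pyRange i L 1)
        = String.ofList ((List.replicate istar.toNat '1' ++ List.replicate (m - istar).toNat '0')
            ++ (List.replicate istar.toNat '1' ++ List.replicate (m - istar).toNat '0').reverse) := by
  have hfd : PySem.Int.floordiv L 2 = m := by
    rw [PySem.Int.floordiv_eq_ediv_of_pos (by norm_num)]
    omega
  have hLL : L * L / 4 = m * m := by rw [hm]; exact quarter_even m
  intro n
  induction n with
  | zero =>
    intro i hi1' hi2' hn
    have hieq : i = istar := by omega
    rw [PySem.List.pyRange_one_cons (by omega)]
    simp only [searchEven, hfd]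
    rw [if_pos (by rw [hieq, getPos_even m istar hi1 hi2]; omega), hieq]
  | succ n ih =>
    intro i hi1' hi2' hn
    have hilt : i < istar := by omega
    rw [PySem.List.pyRange_one_cons (by omega)]
    simp only [searchEven, hfd]
    rw [if_neg (by rw [getPos_even m i hi1' (by omega)]; omega)]
    exact ih (i + 1) (by omega) (by omega) (by omega)

theorem searchOdd_run (pos L m : Int) (hm : L = 2 * m + 1) (_h1m : 1 ≤ m)
    (istar : Int) (hi1 : 1 ≤ istar) (hi2 : istar ≤ m + 1)
    (hpos : pos = L * L / 4 + istar) :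
    ∀ (n : Nat) (i : Int), 1 ≤ i → i ≤ istar → (istar - i).toNat = n →
      searchOdd pos L (PySem.List.pyRange i L 1)
        = String.ofList ((List.replicate istar.toNat '1' ++ List.replicate (m + 1 - istar).toNat '0')
            ++ (List.replicate istar.toNat '1' ++ List.replicate (m + 1 - istar).toNat '0').dropLast.reverse) := by
  have hch : ceilHalf L = m + 1 := by rw [ceilHalf_eq]; omega
  have hLL : L * L / 4 = m * m + m := by rw [hm]; exact quarter_odd m
  intro n
  induction n with
  | zero =>
    intro i hi1' hi2' hn
    have hieq : i = istar := by omega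
    rw [PySem.List.pyRange_one_cons (by omega)]
    simp only [searchOdd, hch]
    rw [if_pos (by rw [hieq, getPos_odd m istar (by omega) hi1 hi2]; omega), hieq]
  | succ n ih =>
    intro i hi1' hi2' hn
    have hilt : i < istar := by omega
    rw [PySem.List.pyRange_one_cons (by omega)]
    simp only [searchOdd, hch]
    rw [if_neg (by rw [getPos_odd m i (by omega) hi1' (by omega)]; omega)]
    exact ih (i + 1) (by omega) (by omega) (by omega)

-- ===== VERDICT (by name: the statement is the Claim_ definition above) =====
theorem solve_spec : Claim_equal_solve := by
  unfold Claim_equal_solve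
  intro pos _ hpre
  unfold Spec_solve
  by_cases hp1 : pos = 1
  · subst hp1
    have h3 : ((4 : Int) * 1 - 1).toNat = 3 := by decide
    have hs : Nat.sqrt 3 = 1 := by
      have ha := Nat.sqrt_le 3
      have hb := Nat.lt_succ_sqrt 3
      rcases Nat.lt_or_ge (Nat.sqrt 3) 2 with h | h
      · rcases (by omega : Nat.sqrt 3 = 0 ∨ Nat.sqrt 3 = 1) with h' | h'
        · rw [h'] at hb; norm_num at hb
        · exact h'
      · have := Nat.mul_le_mul h h
        omega
    rw [show solve 1 = "1" from rfl]
    simp only [solve_alt, h3, hs]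
    decide
  · have h2 : 2 ≤ pos := by
      unfold Pre_solve at hpre
      omega
    simp only [solve, solve_alt, hp1, if_false]
    generalize hLdef : ((4 * pos - 1).toNat.sqrt : Int) = L
    have hs1 : ((4 * pos - 1).toNat.sqrt * (4 * pos - 1).toNat.sqrt : Nat) ≤ (4 * pos - 1).toNat :=
      Nat.sqrt_le _
    have hs2 : (4 * pos - 1).toNat < ((4 * pos - 1).toNat.sqrt + 1) * ((4 * pos - 1).toNat.sqrt + 1) :=
      Nat.lt_succ_sqrt _
    have hcast : (((4 * pos - 1).toNat : Nat) : Int) = 4 * pos - 1 := by omega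
    have hlb : L * L / 4 < pos := by
      have h' : (L * L : Int) ≤ (((4 * pos - 1).toNat : Nat) : Int) := by
        rw [← hLdef]; exact_mod_cast hs1
      rw [hcast] at h'
      generalize L * L = B at h' ⊢
      omega
    have hub : pos ≤ (L + 1) * (L + 1) / 4 := by
      have h' : (((4 * pos - 1).toNat : Nat) : Int) < (L + 1) * (L + 1) := by
        rw [← hLdef]; exact_mod_cast hs2
      rw [hcast] at h'
      generalize (L + 1) * (L + 1) = A at h' ⊢
      omega
    have hL0 : 0 ≤ L := by rw [← hLdef]; positivity
    have hL2 : 2 ≤ L := by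
      by_contra hq
      have : L = 0 ∨ L = 1 := by omega
      rcases this with h | h <;> rw [h] at hub <;> norm_num at hub <;> omega
    have hgl := getLen_eq pos L hL2 hub hlb
    rw [hgl]
    show (if PySem.Int.mod L 2 = 0 then searchEven pos L (PySem.List.pyRange 1 L 1)
      else searchOdd pos L (PySem.List.pyRange 1 L 1)) = _
    have hbs := base_step L
    have histar1 : 1 ≤ pos - L * L / 4 := by omega
    have histar2 : pos - L * L / 4 ≤ (L + 1) / 2 := by omega
    have hfdh : PySem.Int.floordiv (L + 1) 2 = (L + 1) / 2 :=
      PySem.Int.floordiv_eq_ediv_of_pos (by norm_num)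
    have hfd4 : PySem.Int.floordiv (L * L) 4 = L * L / 4 :=
      PySem.Int.floordiv_eq_ediv_of_pos (by norm_num)
    rcases Int.even_or_odd L with ⟨m, hk⟩ | ⟨m, hk⟩
    · -- L = 2m even
      have hm : L = 2 * m := by omega
      have hmod : PySem.Int.mod L 2 = 0 := by
        rw [PySem.Int.mod_eq_emod_of_pos (by norm_num)]
        omega
      have hhm : (L + 1) / 2 = m := by omega
      rw [if_pos hmod, if_pos hmod, hfdh, hfd4, hhm]
      exact searchEven_run pos L m hm (by omega) (pos - L * L / 4) histar1 (by omega) (by ring)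
        (pos - L * L / 4 - 1).toNat 1 (by omega) (by omega) (by omega)
    · -- L = 2m + 1 odd
      have hm : L = 2 * m + 1 := hk
      have hmod : PySem.Int.mod L 2 = 1 := by
        rw [PySem.Int.mod_eq_emod_of_pos (by norm_num)]
        omega
      have hhm : (L + 1) / 2 = m + 1 := by omega
      have hch : ceilHalf L = m + 1 := by rw [ceilHalf_eq]; omega
      have hne : ¬ PySem.Int.mod L 2 = 0 := by rw [hmod]; norm_num
      rw [if_neg hne, if_neg hne, hfdh, hfd4, hhm]
      exact searchOdd_run pos L m hm (by omega) (pos - L * L / 4) histar1 (by omega) (by ring)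
        (pos - L * L / 4 - 1).toNat 1 (by omega) (by omega) (by omega)
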